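-- pv_equiv track=rewrite | github.com/atmeza/cse158hw4 | hw4.py | featureUB
-- ===== SOURCE A (Python) =====
-- import string
--
-- def featureUB(datum, top, ID):
-- 	feat = [0]*1000
-- 	punctuation = string.punctuation
-- 	r = ''.join([c for c in datum.lower() if not c in punctuation])
-- 	kWords = r.split()
-- 	for index, w in enumerate(kWords):
-- 		if index < len(kWords)-1:
-- 			word = w + " " + kWords[index+1] ##bigrams
-- 			if word in top:
-- 				feat[ID[word]] += 1
-- 			if w in top:
-- 				feat[ID[w]] += 1
-- 	feat.append(1) #offset
-- 	return feat
-- ===== SOURCE B (Python) =====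
-- import string
--
-- def featureUB(datum, top, ID):
--     r = ''.join([c for c in datum.lower() if c not in string.punctuation])
--     kWords = r.split()
--     counts = {}
--     for w, nxt in zip(kWords, kWords[1:]):
--         bigram = w + " " + nxt
--         counts[bigram] = counts.get(bigram, 0) + 1
--         counts[w] = counts.get(w, 0) + 1
--     feat = [0]*1000
--     for key, c in counts.items():
--         if key in top:
--             feat[ID[key]] += c
--     feat.append(1)
--     return feat
-- ===== Notes on version B (the rewrite author's own statement) =====
-- stated objective: alternative
-- what changed: B first aggregates all unigram/bigram occurrences into one count dictionary in a single zip pass and then fills the feature vector once per distinct key (one 'in top' membership test and one indexed addition per distinct key), instead of A's per-occurrence membership tests and increments inside the enumerate loop.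
import Mathlib
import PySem

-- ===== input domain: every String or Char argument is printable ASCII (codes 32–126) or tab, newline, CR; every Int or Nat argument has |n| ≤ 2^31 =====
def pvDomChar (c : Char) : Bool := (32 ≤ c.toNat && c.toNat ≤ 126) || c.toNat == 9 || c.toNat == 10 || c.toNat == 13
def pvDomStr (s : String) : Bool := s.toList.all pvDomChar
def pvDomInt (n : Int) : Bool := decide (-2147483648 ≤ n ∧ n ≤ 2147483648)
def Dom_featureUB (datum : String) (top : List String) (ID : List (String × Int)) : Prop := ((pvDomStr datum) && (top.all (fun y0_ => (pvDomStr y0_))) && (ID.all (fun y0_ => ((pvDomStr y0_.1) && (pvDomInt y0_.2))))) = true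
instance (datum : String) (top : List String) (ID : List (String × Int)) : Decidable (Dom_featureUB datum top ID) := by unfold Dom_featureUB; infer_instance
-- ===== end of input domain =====

-- B aggregates the unigram/bigram occurrences into one count dictionary first and then fills the
-- feature vector from the counted items, instead of A's per-occurrence membership test and increment.

-- ===== PORT A =====
-- string.punctuation
def pvPunct : List Char := "!\"#$%&'()*+,-./:;<=>?@[\\]^_`{|}~".toList

-- shared cleaning step: r = ''.join([c for c in datum.lower() if c not in string.punctuation]); kWords = r.split()
-- (both Pythons contain these identical two lines)
def pvKWords (datum : String) : List String :=
  PySem.Str.split₀ (String.ofList ((PySem.Str.lower datum).toList.filter (fun c => !(pvPunct.contains c))))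

def featureUB (datum : String) (top : List String) (ID : List (String × Int)) : List Int :=
  let feat : List Int := List.replicate 1000 0
  let kWords := pvKWords datum
  let feat := (PySem.List.enumerate kWords).foldl (fun feat iw =>
    if iw.1 < PySem.List.len kWords - 1 then
      let word := iw.2 ++ " " ++ PySem.List.pyGetD kWords (iw.1 + 1) ""
      let feat := if top.contains word then
          PySem.List.pySetD feat (PySem.Dict.getD (PySem.Dict.mk ID) word 0)
            (PySem.List.pyGetD feat (PySem.Dict.getD (PySem.Dict.mk ID) word 0) 0 + 1)
        else feat
      if top.contains iw.2 then
        PySem.List.pySetD feat (PySem.Dict.getD (PySem.Dict.mk ID) iw.2 0)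
          (PySem.List.pyGetD feat (PySem.Dict.getD (PySem.Dict.mk ID) iw.2 0) 0 + 1)
      else feat
    else feat) feat
  feat ++ [1]

-- ===== PORT B =====
def featureUB_alt (datum : String) (top : List String) (ID : List (String × Int)) : List Int :=
  let kWords := pvKWords datum
  let counts := (kWords.zip (PySem.List.slice kWords (some 1) none)).foldl (fun d p =>
      let bigram := p.1 ++ " " ++ p.2
      let d := d.insert bigram (d.getD bigram 0 + 1)
      d.insert p.1 (d.getD p.1 0 + 1)) PySem.Dict.empty
  let feat := counts.items.foldl (fun feat kc =>
      if top.contains kc.1 then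
        PySem.List.pySetD feat (PySem.Dict.getD (PySem.Dict.mk ID) kc.1 0)
          (PySem.List.pyGetD feat (PySem.Dict.getD (PySem.Dict.mk ID) kc.1 0) 0 + kc.2)
      else feat) (List.replicate 1000 0)
  feat ++ [1]

-- ===== PRECONDITION & SPEC =====
-- the unigram/bigram keys A looks up, in processing order
def pvSeq (datum : String) : List String :=
  ((pvKWords datum).zip (pvKWords datum).tail).flatMap (fun p => [p.1 ++ " " ++ p.2, p.1])

-- Pre_ excludes exactly the inputs on which the Python A raises: a counted key that is in top but is
-- missing from ID (KeyError) or whose ID index lies outside [-1000, 1000) (IndexError on feat).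
def Pre_featureUB (datum : String) (top : List String) (ID : List (String × Int)) : Prop :=
  (pvSeq datum).all (fun k => !top.contains k ||
    (match (PySem.Dict.mk ID).get? k with
     | some v => decide (-1000 ≤ v ∧ v < 1000)
     | none => false)) = true
instance (datum : String) (top : List String) (ID : List (String × Int)) : Decidable (Pre_featureUB datum top ID) := by unfold Pre_featureUB; infer_instance

def pvWitness_featureUB : String × List String × (List (String × Int)) :=
  ("a b a", ["a", "a b"], [("a", 3), ("a b", 5)])

def Spec_featureUB (datum : String) (top : List String) (ID : List (String × Int)) (out : List Int) : Prop := out = featureUB_alt datum top ID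
instance (datum : String) (top : List String) (ID : List (String × Int)) (out : List Int) : Decidable (Spec_featureUB datum top ID out) := by unfold Spec_featureUB; infer_instance

-- ===== CLAIM (what is proved, stated in full; the proofs are below) =====
def Claim_equal_featureUB : Prop := ∀ (datum : String) (top : List String) (ID : List (String × Int)), Dom_featureUB datum top ID → Pre_featureUB datum top ID → Spec_featureUB datum top ID (featureUB datum top ID)

-- ===== LEMMAS AND PROOFS =====

-- one feature update: feat[ID[k]] += c when k is in top; identity otherwise
def pvIdOf (ID : List (String × Int)) (k : String) : Int := PySem.Dict.getD (PySem.Dict.mk ID) k 0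

def pvBump (top : List String) (ID : List (String × Int)) (f : List Int) (k : String) (c : Int) : List Int :=
  if top.contains k then
    PySem.List.pySetD f (pvIdOf ID k) (PySem.List.pyGetD f (pvIdOf ID k) 0 + c)
  else f

theorem pvIdx_lt {n : Nat} {i : Int} {k : Nat} (h : PySem.List.pyIdx? n i = some k) : k < n := by
  unfold PySem.List.pyIdx? at h
  split_ifs at h <;> simp_all <;> omega

theorem pvSetD_none {α : Type} (xs : List α) {i : Int} (v : α)
    (h : PySem.List.pyIdx? xs.length i = none) : PySem.List.pySetD xs i v = xs := by
  simp [PySem.List.pySetD, PySem.List.pySet?, h]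

theorem pvSetD_some {α : Type} (xs : List α) {i : Int} (v : α) {k : Nat}
    (h : PySem.List.pyIdx? xs.length i = some k) : PySem.List.pySetD xs i v = xs.set k v := by
  simp [PySem.List.pySetD, PySem.List.pySet?, h]

theorem pvGetD_some {α : Type} (xs : List α) {i : Int} (d : α) {k : Nat}
    (h : PySem.List.pyIdx? xs.length i = some k) :
    PySem.List.pyGetD xs i d = xs[k]'(pvIdx_lt h) := by
  simp [PySem.List.pyGetD, PySem.List.pyGet?, h, List.getElem?_eq_getElem (pvIdx_lt h)]

theorem pvBump_add (top : List String) (ID : List (String × Int)) (f : List Int) (k : String)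
    (a b : Int) : pvBump top ID (pvBump top ID f k a) k b = pvBump top ID f k (a + b) := by
  unfold pvBump
  rcases hk : top.contains k with _ | _
  · simp only [Bool.false_eq_true, if_false]
  · simp only [if_true]
    rcases h : PySem.List.pyIdx? f.length (pvIdOf ID k) with _ | m
    · rw [pvSetD_none _ _ h, pvSetD_none _ _ h, pvSetD_none _ _ h]
    · have hm := pvIdx_lt h
      rw [pvGetD_some _ _ h, pvSetD_some _ _ h]
      have h2 : PySem.List.pyIdx? (f.set m (f[m]'hm + a)).length (pvIdOf ID k) = some m := by
        rw [List.length_set]; exact h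
      rw [pvGetD_some _ _ h2, pvSetD_some _ _ h2, List.set_set, List.getElem_set_self,
        pvSetD_some _ _ h]
      congr 1
      ring

theorem pvBump_comm (top : List String) (ID : List (String × Int)) (f : List Int)
    (k k' : String) (a b : Int) :
    pvBump top ID (pvBump top ID f k a) k' b = pvBump top ID (pvBump top ID f k' b) k a := by
  rcases hk : top.contains k with _ | _
  · unfold pvBump; simp only [hk, Bool.false_eq_true, if_false]
  · rcases hk' : top.contains k' with _ | _
    · unfold pvBump; simp only [hk', Bool.false_eq_true, if_false]
    · unfold pvBump
      simp only [hk, hk', if_true]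
      rcases h : PySem.List.pyIdx? f.length (pvIdOf ID k) with _ | m
      · rcases h' : PySem.List.pyIdx? f.length (pvIdOf ID k') with _ | p
        · rw [pvSetD_none _ _ h, pvSetD_none _ _ h', pvSetD_none _ _ h]
        · have hp := pvIdx_lt h'
          rw [pvSetD_none _ _ h, pvGetD_some _ _ h', pvSetD_some _ _ h']
          have h2 : PySem.List.pyIdx? (f.set p (f[p]'hp + b)).length (pvIdOf ID k) = none := by
            rw [List.length_set]; exact h
          rw [pvSetD_none _ _ h2]
      · have hm := pvIdx_lt h
        rcases h' : PySem.List.pyIdx? f.length (pvIdOf ID k') with _ | p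
        · rw [pvGetD_some _ _ h, pvSetD_some _ _ h, pvSetD_none _ _ h']
          have h2 : PySem.List.pyIdx? (f.set m (f[m]'hm + a)).length (pvIdOf ID k') = none := by
            rw [List.length_set]; exact h'
          rw [pvSetD_none _ _ h2, pvGetD_some _ _ h, pvSetD_some _ _ h]
        · have hp := pvIdx_lt h'
          rw [pvGetD_some _ _ h, pvSetD_some _ _ h, pvGetD_some _ _ h', pvSetD_some _ _ h']
          have h2 : PySem.List.pyIdx? (f.set m (f[m]'hm + a)).length (pvIdOf ID k') = some p := by
            rw [List.length_set]; exact h'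
          have h3 : PySem.List.pyIdx? (f.set p (f[p]'hp + b)).length (pvIdOf ID k) = some m := by
            rw [List.length_set]; exact h
          rw [pvGetD_some _ _ h2, pvSetD_some _ _ h2, pvGetD_some _ _ h3, pvSetD_some _ _ h3]
          by_cases hmp : m = p
          · subst hmp
            rw [List.set_set, List.set_set, List.getElem_set_self, List.getElem_set_self]
            congr 1
            ring
          · rw [List.getElem_set_ne (by omega), List.getElem_set_ne (by omega),
              List.set_comm _ _ hmp]

theorem pvFold_replicate (top : List String) (ID : List (String × Int)) (n : Nat) :
    ∀ (f : List Int) (k : String),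
      (List.replicate (n + 1) k).foldl (fun f k => pvBump top ID f k 1) f
        = pvBump top ID f k ((n : Int) + 1) := by
  induction n with
  | zero => intro f k; simp [List.replicate]
  | succ n ih =>
    intro f k
    rw [List.replicate_succ, List.foldl_cons, ih, pvBump_add]
    congr 1
    push_cast
    ring

theorem pvCount_flatMap {α : Type} [DecidableEq α] (a : α) (g : α → Nat) :
    ∀ (ds : List α), ds.Nodup →
      ((ds.flatMap (fun k => List.replicate (g k) k)).count a) = if a ∈ ds then g a else 0 := by
  intro ds
  induction ds with
  | nil => simp
  | cons d ds ih =>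
    intro hnd
    rw [List.flatMap_cons, List.count_append, List.count_replicate, ih hnd.of_cons]
    rcases List.nodup_cons.mp hnd with ⟨hd, _⟩
    by_cases had : a = d
    · subst had; simp [hd]
    · simp [had, Ne.symm had]

theorem pvPerm_expand (l : List String) :
    l.Perm ((PySem.List.dedup l).flatMap (fun k => List.replicate (l.count k) k)) := by
  rw [List.perm_iff_count]
  intro a
  rw [pvCount_flatMap a (fun k => l.count k) _ (PySem.List.nodup_dedup l)]
  by_cases h : a ∈ l
  · simp [h]
  · simp [h, List.count_eq_zero.mpr h]

theorem pvCore (top : List String) (ID : List (String × Int)) (l : List String) (f : List Int) :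
    l.foldl (fun f k => pvBump top ID f k 1) f
      = ((PySem.Set.ofList l).map (fun k => (k, (l.count k : Int)))).foldl
          (fun f p => pvBump top ID f p.1 p.2) f := by
  have hperm := pvPerm_expand l
  have hcomm : RightCommutative (fun f k => pvBump top ID f k 1) :=
    ⟨fun f k k' => pvBump_comm top ID f k k' 1 1⟩
  rw [@List.Perm.foldl_eq _ _ _ _ _ hcomm hperm f, List.foldl_flatMap]
  rw [← PySem.List.dedup_eq_ofList, List.foldl_map]
  apply PySem.List.foldl_congr_mem
  intro acc k hk
  have hmem : k ∈ l := (PySem.List.mem_dedup l k).mp hk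
  have hpos : 0 < l.count k := List.count_pos_iff.mpr hmem
  obtain ⟨n, hn⟩ : ∃ n, l.count k = n + 1 := ⟨l.count k - 1, by omega⟩
  rw [hn, pvFold_replicate]
  have hcast : ((n : Int) + 1) = ((n + 1 : Nat) : Int) := by push_cast; ring
  rw [hcast]

-- the loop body of A, abstracted over the full word list L
def pvBodyA (top : List String) (ID : List (String × Int)) (L : List String)
    (feat : List Int) (iw : Int × String) : List Int :=
  if iw.1 < PySem.List.len L - 1 then
    let word := iw.2 ++ " " ++ PySem.List.pyGetD L (iw.1 + 1) ""
    let feat := if top.contains word then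
        PySem.List.pySetD feat (PySem.Dict.getD (PySem.Dict.mk ID) word 0)
          (PySem.List.pyGetD feat (PySem.Dict.getD (PySem.Dict.mk ID) word 0) 0 + 1)
      else feat
    if top.contains iw.2 then
      PySem.List.pySetD feat (PySem.Dict.getD (PySem.Dict.mk ID) iw.2 0)
        (PySem.List.pyGetD feat (PySem.Dict.getD (PySem.Dict.mk ID) iw.2 0) 0 + 1)
    else feat
  else feat

theorem pvEnumA (top : List String) (ID : List (String × Int)) (L : List String) :
    ∀ (rest : List String) (i : Nat) (f : List Int), L.drop i = rest →
      (PySem.List.enumerate rest (i : Int)).foldl (pvBodyA top ID L) f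
        = (rest.zip rest.tail).foldl
            (fun f p => pvBump top ID (pvBump top ID f (p.1 ++ " " ++ p.2) 1) p.1 1) f := by
  intro rest
  induction rest with
  | nil => intro i f _; simp [PySem.List.enumerate]
  | cons w rest' ih =>
    intro i f hdrop
    have hi : i ≤ L.length := by
      by_contra hc
      rw [List.drop_eq_nil_of_le (by omega)] at hdrop
      exact List.cons_ne_nil _ _ hdrop.symm
    have hlen : L.length = i + 1 + rest'.length := by
      have h1 := congrArg List.length hdrop
      simp only [List.length_drop, List.length_cons] at h1
      omega
    rw [PySem.List.enumerate_cons, List.foldl_cons]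
    rcases rest' with _ | ⟨n, rest''⟩
    · simp only [List.length_nil] at hlen
      have hguard : ¬ ((i : Int) < PySem.List.len L - 1) := by
        simp only [PySem.List.len_eq]
        omega
      simp only [pvBodyA, hguard, if_neg, not_false_iff]
      simp [PySem.List.enumerate]
    · simp only [List.length_cons] at hlen
      have hdrop' : L.drop (i + 1) = n :: rest'' := by
        rw [← List.drop_drop]
        simp [hdrop]
      have hguard : (i : Int) < PySem.List.len L - 1 := by
        simp only [PySem.List.len_eq]
        omega
      have hget : PySem.List.pyGetD L ((i : Int) + 1) "" = n := by
        have h1 : ((i : Int) + 1) = ((i + 1 : Nat) : Int) := by push_cast; ring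
        have h0 : (L.drop (i + 1)).getD 0 "" = n := by rw [hdrop']; rfl
        rw [h1, PySem.List.pyGetD_natCast]
        rw [← h0]
        have hidx : i + 1 < L.length := by omega
        rw [List.getD_eq_getElem _ _ hidx, List.getD_eq_getElem _ _ (by simp [hdrop'])]
        rw [List.getElem_drop]
      have hbody : pvBodyA top ID L f ((i : Int), w)
          = pvBump top ID (pvBump top ID f (w ++ " " ++ n) 1) w 1 := by
        simp only [pvBodyA, hguard, if_pos, hget, pvBump, pvIdOf]
      rw [hbody]
      have h1 : ((i : Int) + 1) = ((i + 1 : Nat) : Int) := by push_cast; ring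
      rw [h1, ih (i + 1) _ hdrop']
      simp

theorem pvCountsEq (ks : List String) :
    (ks.zip ks.tail).foldl (fun d p =>
      let bigram := p.1 ++ " " ++ p.2
      let d := d.insert bigram (d.getD bigram 0 + 1)
      d.insert p.1 (d.getD p.1 0 + 1)) PySem.Dict.empty
    = PySem.Dict.counter ((ks.zip ks.tail).flatMap (fun p => [p.1 ++ " " ++ p.2, p.1])) := by
  rw [← PySem.Dict.foldl_insert_getD_add_one_eq_counter, List.foldl_flatMap]
  rfl

-- ===== VERDICT (by name: the statement is the Claim_ definition above) =====
theorem featureUB_spec : Claim_equal_featureUB := by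
  intro datum top ID _ _
  unfold Spec_featureUB featureUB featureUB_alt
  simp only [PySem.List.slice_from_one]
  rw [pvCountsEq, PySem.Dict.items_counter]
  have hA := pvEnumA top ID (pvKWords datum) (pvKWords datum) 0 (List.replicate 1000 0) (by simp)
  simp only [Int.natCast_zero] at hA
  have hbody : (PySem.List.enumerate (pvKWords datum) 0).foldl
      (pvBodyA top ID (pvKWords datum)) (List.replicate 1000 0)
      = (PySem.List.enumerate (pvKWords datum) 0).foldl (fun feat iw =>
        if iw.1 < PySem.List.len (pvKWords datum) - 1 then
          let word := iw.2 ++ " " ++ PySem.List.pyGetD (pvKWords datum) (iw.1 + 1) ""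
          let feat := if top.contains word then
              PySem.List.pySetD feat (PySem.Dict.getD (PySem.Dict.mk ID) word 0)
                (PySem.List.pyGetD feat (PySem.Dict.getD (PySem.Dict.mk ID) word 0) 0 + 1)
            else feat
          if top.contains iw.2 then
            PySem.List.pySetD feat (PySem.Dict.getD (PySem.Dict.mk ID) iw.2 0)
              (PySem.List.pyGetD feat (PySem.Dict.getD (PySem.Dict.mk ID) iw.2 0) 0 + 1)
          else feat
        else feat) (List.replicate 1000 0) := rfl
  rw [← hbody, hA]
  have hcore := pvCore top ID
      (((pvKWords datum).zip (pvKWords datum).tail).flatMap (fun p => [p.1 ++ " " ++ p.2, p.1]))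
      (List.replicate 1000 0)
  rw [List.foldl_flatMap] at hcore
  simp only [List.foldl_cons, List.foldl_nil] at hcore
  have h2 : (fun (feat : List Int) (kc : String × Int) =>
      if top.contains kc.1 then
        PySem.List.pySetD feat (PySem.Dict.getD (PySem.Dict.mk ID) kc.1 0)
          (PySem.List.pyGetD feat (PySem.Dict.getD (PySem.Dict.mk ID) kc.1 0) 0 + kc.2)
      else feat) = (fun (f : List Int) (p : String × Int) => pvBump top ID f p.1 p.2) := by
    funext f p
    simp [pvBump, pvIdOf]
  rw [h2]
  rw [hcore]
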